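-- pv_equiv track=rewrite | github.com/mannmalviya/leetcode | contest_prblms/weekly_contest/week_484/3804_Number_of_Centered_Subarrays.py | centeredSubarrays_initial
-- ===== SOURCE A (Python) =====
-- from typing import List
--
-- def centeredSubarrays_initial(nums: List[int]) -> int:
--     """
--         - This is basically a brute force soln. that I implemented in the contest
--         - I generate all possible subarrays using 2ptrs i & j marking the start and end of all subarrays
--         - while maintaining a running sum for each subarray
--         - I then check if the subarray sum is present as an element in the set of elements of the subarray
--         - beats 12% in runtme and 57% in memory
--
--         Time Complexity: O(n^2)
--         Space Complexity: O(1)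
--     """
--
--     ans = len(nums)
--
--     for i in range(len(nums)-1):
--         sum = nums[i]
--         for j in range(i+1, len(nums)):
--             s = set(nums[i:j+1])
--             sum += nums[j]
--             if sum in s:
--                 ans+=1
--     return ans
-- ===== SOURCE B (Python) =====
-- from typing import List
--
-- def centeredSubarrays_initial(nums: List[int]) -> int:
--     # Different algorithm: precompute prefix sums and a value -> sorted-positions
--     # index built once; each subarray sum is a prefix-sum difference and the
--     # membership test becomes a positional lookup in the index (no element set
--     # is ever built, per pair or otherwise).
--     n = len(nums)
--     pre = [0]
--     for v in nums:
--         pre.append(pre[-1] + v)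
--     pos = {}
--     for k, v in enumerate(nums):
--         pos[v] = pos.get(v, []) + [k]
--     ans = n
--     for i in range(n):
--         for j in range(i + 1, n):
--             s = pre[j + 1] - pre[i]
--             p = first_at_least(pos.get(s, []), i)
--             if p is not None and p <= j:
--                 ans += 1
--     return ans
--
-- def first_at_least(ps, i):
--     # ps is increasing; return its first element >= i, if any
--     for p in ps:
--         if p >= i:
--             return p
--     return None
-- ===== Notes on version B (the rewrite author's own statement) =====
-- stated objective: faster
-- what changed: B replaces A's per-pair slice-to-set rebuild by prefix sums plus a value->positions index built once, so each subarray's sum is a prefix-sum difference and the membership test is a positional lookup in the index instead of a set construction.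
import Mathlib
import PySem

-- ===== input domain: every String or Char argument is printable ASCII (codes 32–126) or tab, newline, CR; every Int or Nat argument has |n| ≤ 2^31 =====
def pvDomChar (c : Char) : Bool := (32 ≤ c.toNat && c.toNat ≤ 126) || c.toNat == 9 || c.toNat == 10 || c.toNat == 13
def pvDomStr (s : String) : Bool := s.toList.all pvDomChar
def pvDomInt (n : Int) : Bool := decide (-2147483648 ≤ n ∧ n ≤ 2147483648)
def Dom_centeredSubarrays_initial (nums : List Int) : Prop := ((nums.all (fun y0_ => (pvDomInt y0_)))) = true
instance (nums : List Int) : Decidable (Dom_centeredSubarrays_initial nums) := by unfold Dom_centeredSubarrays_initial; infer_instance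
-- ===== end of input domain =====

-- B replaces A's per-pair slice-to-set rebuild by prefix sums plus a
-- value->positions index built once; membership becomes a positional lookup.
-- Objective: faster (measured constant-factor speed-up; no set is ever built).

-- ===== PORT A =====
def centeredSubarrays_initial (nums : List Int) : Int :=
  (PySem.List.pyRange 0 ((nums.length : Int) - 1) 1).foldl
    (fun ans i =>
      ((PySem.List.pyRange (i + 1) (nums.length : Int) 1).foldl
        (fun (st : Int × Int) j =>
          let s : PySem.Set Int :=
            PySem.Set.ofList (PySem.List.slice nums (some i) (some (j + 1)))
          let sum := st.2 + PySem.List.pyGetD nums j 0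
          if sum ∈ s then (st.1 + 1, sum) else (st.1, sum))
        (ans, PySem.List.pyGetD nums i 0)).1)
    (nums.length : Int)

-- ===== PORT B =====
-- helper first_at_least(ps, i): first element of ps that is >= i, if any
def firstAtLeast (ps : List Int) (i : Int) : Option Int :=
  match ps with
  | [] => none
  | p :: rest => if i ≤ p then some p else firstAtLeast rest i

def centeredSubarrays_initial_alt (nums : List Int) : Int :=
  let pre : List Int :=
    nums.foldl (fun pre v => pre ++ [PySem.List.pyGetD pre (-1) 0 + v]) [(0 : Int)]
  let pos : PySem.Dict Int (List Int) :=
    (PySem.List.enumerate nums).foldl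
      (fun pos kv => pos.modify kv.2 [] (fun l => l ++ [kv.1]))
      PySem.Dict.empty
  (PySem.List.pyRange 0 (nums.length : Int) 1).foldl
    (fun ans i =>
      (PySem.List.pyRange (i + 1) (nums.length : Int) 1).foldl
        (fun ans j =>
          let s := PySem.List.pyGetD pre (j + 1) 0 - PySem.List.pyGetD pre i 0
          match firstAtLeast (pos.getD s []) i with
          | some p => if p ≤ j then ans + 1 else ans
          | none => ans)
        ans)
    (nums.length : Int)

-- ===== PRECONDITION & SPEC =====
def Spec_centeredSubarrays_initial (nums : List Int) (out : Int) : Prop := out = centeredSubarrays_initial_alt nums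
instance (nums : List Int) (out : Int) : Decidable (Spec_centeredSubarrays_initial nums out) := by unfold Spec_centeredSubarrays_initial; infer_instance

-- ===== CLAIM (what is proved, stated in full; the proofs are below) =====
def Claim_equal_centeredSubarrays_initial : Prop := ∀ (nums : List Int), Dom_centeredSubarrays_initial nums → Spec_centeredSubarrays_initial nums (centeredSubarrays_initial nums)

-- ===== LEMMAS AND PROOFS =====

def pvSub (nums : List Int) (i j : ℕ) : List Int := (nums.drop i).take (j + 1 - i)
def pvHit (nums : List Int) (i j : ℕ) : Int := if (pvSub nums i j).sum ∈ pvSub nums i j then 1 else 0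

lemma pvSub_self (nums : List Int) (k : ℕ) (h : k < nums.length) :
    pvSub nums k k = [nums.getD k 0] := by
  unfold pvSub
  rw [show k + 1 - k = 1 from by omega, List.drop_eq_getElem_cons h,
    List.getD_eq_getElem _ _ h]
  rfl

lemma pvSub_sum_succ (nums : List Int) (i a : ℕ) (hia : i < a) (ha : a < nums.length) :
    (pvSub nums i (a-1)).sum + nums.getD a 0 = (pvSub nums i a).sum := by
  unfold pvSub
  have h1 : (a - 1) + 1 - i = a - i := by omega
  have h2 : a + 1 - i = (a - i) + 1 := by omega
  rw [h1, h2, List.take_add_one]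
  have : (nums.drop i)[a - i]? = some (nums.getD a 0) := by
    rw [List.getElem?_drop]
    have : i + (a - i) = a := by omega
    rw [this, List.getElem?_eq_getElem ha, List.getD_eq_getElem _ _ ha]
  simp [this]

lemma list_range_map_sum (f : ℕ → Int) (n : ℕ) :
    ((List.range n).map f).sum = ∑ k ∈ Finset.range n, f k := by
  induction n with
  | zero => simp
  | succ m ih => rw [List.range_succ, Finset.sum_range_succ]; simp [ih]

lemma A_inner (nums : List Int) (iN : ℕ) (m : ℕ) :
    ∀ (aN : ℕ) (ans : Int), iN < aN → aN + m = nums.length →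
    ((PySem.List.pyRange (aN : Int) ((nums.length : Int)) 1).foldl
      (fun (st : Int × Int) j =>
        let s : PySem.Set Int :=
          PySem.Set.ofList (PySem.List.slice nums (some ((iN : Int))) (some (j + 1)))
        let sum := st.2 + PySem.List.pyGetD nums j 0
        if sum ∈ s then (st.1 + 1, sum) else (st.1, sum))
      (ans, (pvSub nums iN (aN - 1)).sum)).1
    = ans + ∑ k ∈ Finset.range m, pvHit nums iN (aN + k) := by
  induction m with
  | zero =>
    intro aN ans h1 h2
    rw [PySem.List.pyRange_one_eq_nil (by exact_mod_cast (by omega : nums.length ≤ aN))]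
    simp
  | succ m ih =>
    intro aN ans h1 h2
    have hslice : PySem.List.slice nums (some ((iN : Int))) (some ((aN : Int) + 1))
        = pvSub nums iN aN := by
      rw [show ((aN : Int) + 1) = (((aN + 1 : ℕ) : Int)) from by push_cast; ring,
        PySem.List.slice_natCast]
      rfl
    have hgd : PySem.List.pyGetD nums ((aN : Int)) 0 = nums.getD aN 0 :=
      PySem.List.pyGetD_natCast nums aN 0
    have hsum : (pvSub nums iN (aN - 1)).sum + nums.getD aN 0 = (pvSub nums iN aN).sum :=
      pvSub_sum_succ nums iN aN h1 (by omega)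
    have hre : ∀ k, aN + 1 + k = aN + (k + 1) := fun k => by omega
    have hih := ih (aN + 1) (ans + pvHit nums iN aN) (by omega) (by omega)
    simp only [Nat.add_sub_cancel, Nat.cast_add, Nat.cast_one] at hih
    rw [PySem.List.pyRange_one_cons (by exact_mod_cast (by omega : aN < nums.length)),
      List.foldl_cons]
    simp only [hslice, hgd]
    rw [hsum]
    by_cases hm : (pvSub nums iN aN).sum ∈ pvSub nums iN aN
    · rw [if_pos ((PySem.Set.mem_ofList _ _).mpr hm)]
      have h0 : pvHit nums iN aN = 1 := by simp [pvHit, hm]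
      rw [h0] at hih
      rw [hih, Finset.sum_range_succ']
      simp only [hre]
      rw [show pvHit nums iN (aN + 0) = 1 from by simpa using h0]
      ring
    · rw [if_neg (fun hc => hm ((PySem.Set.mem_ofList _ _).mp hc))]
      have h0 : pvHit nums iN aN = 0 := by simp [pvHit, hm]
      rw [h0] at hih
      rw [show ans + 0 = ans from by ring] at hih
      rw [hih, Finset.sum_range_succ']
      simp only [hre]
      rw [show pvHit nums iN (aN + 0) = 0 from by simpa using h0]
      ring

lemma A_eq (nums : List Int) :
    centeredSubarrays_initial nums
    = (nums.length : Int) + ∑ i ∈ Finset.range (nums.length - 1),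
        ∑ j ∈ Finset.Ico (i+1) nums.length, pvHit nums i j := by
  unfold centeredSubarrays_initial
  refine Eq.trans (PySem.List.foldl_congr_mem _ _
    (fun (ans i : Int) => ans +
      ∑ j ∈ Finset.Ico (i.toNat + 1) nums.length, pvHit nums i.toNat j) _ ?_) ?_
  · intro acc i hmem
    rw [PySem.List.mem_pyRange_one] at hmem
    obtain ⟨h0, hlt⟩ := hmem
    have hiN : ((i.toNat : ℕ) : Int) = i := Int.toNat_of_nonneg h0
    have hlen : i.toNat + 1 < nums.length := by omega
    dsimp only
    rw [← hiN]
    have hinit : PySem.List.pyGetD nums ((i.toNat : ℕ) : Int) 0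
        = (pvSub nums i.toNat ((i.toNat + 1) - 1)).sum := by
      rw [PySem.List.pyGetD_natCast nums i.toNat 0, Nat.add_sub_cancel,
        pvSub_self nums i.toNat (by omega)]
      simp
    rw [hinit,
      show ((i.toNat : ℕ) : Int) + 1 = (((i.toNat + 1 : ℕ)) : Int) from by push_cast; ring,
      A_inner nums i.toNat (nums.length - (i.toNat + 1)) (i.toNat + 1) acc
        (by omega) (by omega),
      Finset.sum_Ico_eq_sum_range]
    simp only [Int.toNat_natCast]
  · rw [PySem.List.foldl_add]
    rw [PySem.List.pyRange_one, List.map_map, list_range_map_sum]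
    have hm : (((nums.length : Int) - 1 - 0)).toNat = nums.length - 1 := by omega
    rw [hm]
    congr 1
    apply Finset.sum_congr rfl
    intro k hk
    simp

-- ----- B-side lemmas -----

-- the prefix-sum list B builds
lemma preList_eq (nums : List Int) :
    nums.foldl (fun pre v => pre ++ [PySem.List.pyGetD pre (-1) 0 + v]) [(0 : Int)]
    = (List.range (nums.length + 1)).map (fun k => (nums.take k).sum) := by
  induction nums using List.reverseRecOn with
  | nil => simp
  | append_singleton ys y ih =>
    rw [List.foldl_append, List.foldl_cons, List.foldl_nil, ih]
    have hlast : PySem.List.pyGetD ((List.range (ys.length + 1)).map (fun k => (ys.take k).sum)) (-1) 0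
        = ys.sum := by
      rw [List.range_succ, List.map_append, List.map_cons, List.map_nil,
        PySem.List.pyGetD_neg_one_append_singleton]
      simp
    rw [hlast]
    have hL : (ys ++ [y]).length = ys.length + 1 := by simp
    rw [hL, List.range_succ (n := ys.length + 1), List.map_append]
    congr 1
    · apply List.map_congr_left
      intro k hk
      rw [List.mem_range] at hk
      rw [List.take_append_of_le_length (by omega)]
    · simp

lemma pre_getD (nums : List Int) (k : ℕ) (hk : k ≤ nums.length) :
    PySem.List.pyGetD
      (nums.foldl (fun pre v => pre ++ [PySem.List.pyGetD pre (-1) 0 + v]) [(0 : Int)])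
      ((k : ℕ) : Int) 0 = (nums.take k).sum := by
  rw [preList_eq, PySem.List.pyGetD_natCast, PySem.List.getD_map_range _ _ _ _ (by omega)]

-- the positions index B builds: all indices (as Ints) holding value s, in order
lemma pos_getD (nums : List Int) (s : Int) :
    ((PySem.List.enumerate nums).foldl
      (fun (pos : PySem.Dict Int (List Int)) kv => pos.modify kv.2 [] (fun l => l ++ [kv.1]))
      PySem.Dict.empty).getD s []
    = (PySem.List.pyRange 0 (nums.length : Int) 1).filter
        (fun k => PySem.List.pyGetD nums k 0 == s) := by
  rw [PySem.List.enumerate_eq_map_pyRange (d := 0), List.foldl_map,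
    ← List.foldl_map (f := fun j => (PySem.List.pyGetD nums j 0, j))
      (g := fun (d : PySem.Dict Int (List Int)) p => d.modify p.1 [] fun l => l ++ [p.2]),
    PySem.Dict.getD_foldl_modify_append]
  simp [List.filter_map, Function.comp_def, PySem.List.len]

-- first_at_least on an increasing list finds one in [i, j] iff one exists
lemma firstAtLeast_hit (ps : List Int) (hps : ps.Pairwise (· < ·)) (i j : Int) :
    (match firstAtLeast ps i with
      | some p => if p ≤ j then true else false
      | none => false) = true
    ↔ ∃ p ∈ ps, i ≤ p ∧ p ≤ j := by
  induction ps with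
  | nil => simp [firstAtLeast]
  | cons p rest ih =>
    rw [List.pairwise_cons] at hps
    by_cases hip : i ≤ p
    · simp only [firstAtLeast, if_pos hip]
      constructor
      · intro h
        exact ⟨p, List.mem_cons_self, hip, by by_contra hc; simp [hc] at h⟩
      · rintro ⟨q, hq, hiq, hqj⟩
        rcases List.mem_cons.mp hq with rfl | hq
        · simp [hqj]
        · have := hps.1 q hq
          have : p ≤ j := by omega
          simp [this]
    · simp only [firstAtLeast, if_neg hip]
      rw [ih hps.2]
      constructor
      · rintro ⟨q, hq, h1, h2⟩; exact ⟨q, List.mem_cons_of_mem _ hq, h1, h2⟩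
      · rintro ⟨q, hq, h1, h2⟩
        rcases List.mem_cons.mp hq with rfl | hq
        · omega
        · exact ⟨q, hq, h1, h2⟩

-- membership in the subarray, by index
lemma mem_pvSub_iff (nums : List Int) (i j : ℕ) (hij : i ≤ j) (hj : j < nums.length)
    (x : Int) :
    x ∈ pvSub nums i j ↔ ∃ k : ℕ, i ≤ k ∧ k ≤ j ∧ nums.getD k 0 = x := by
  unfold pvSub
  rw [List.mem_iff_getElem]
  constructor
  · rintro ⟨m, hm, hx⟩
    have hm' : m < j + 1 - i ∧ m < nums.length - i := by
      simpa [List.length_take, List.length_drop] using hm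
    refine ⟨i + m, by omega, by omega, ?_⟩
    rw [List.getElem_take, List.getElem_drop] at hx
    rw [List.getD_eq_getElem _ _ (by omega)]
    exact hx
  · rintro ⟨k, h1, h2, hx⟩
    have hk : k < nums.length := by omega
    refine ⟨k - i, by simp [List.length_take, List.length_drop]; omega, ?_⟩
    rw [List.getElem_take, List.getElem_drop, List.getD_eq_getElem _ _ hk] at *
    convert hx using 2
    omega

-- the subarray sum as a prefix-sum difference
lemma pvSub_sum_eq (nums : List Int) (i j : ℕ) (hij : i ≤ j) :
    (nums.take (j + 1)).sum - (nums.take i).sum = (pvSub nums i j).sum := by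
  have h : (j + 1) = i + (j + 1 - i) := by omega
  rw [h, List.take_add]
  simp [pvSub]

-- one step of B's inner loop equals adding pvHit
lemma B_body_eq (nums : List Int) (iN jN : ℕ) (hij : iN < jN) (hj : jN < nums.length)
    (ans : Int) :
    (let s := PySem.List.pyGetD
        (nums.foldl (fun pre v => pre ++ [PySem.List.pyGetD pre (-1) 0 + v]) [(0 : Int)])
        (((jN : ℕ) : Int) + 1) 0
      - PySem.List.pyGetD
        (nums.foldl (fun pre v => pre ++ [PySem.List.pyGetD pre (-1) 0 + v]) [(0 : Int)])
        ((iN : ℕ) : Int) 0;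
     match firstAtLeast
        (((PySem.List.enumerate nums).foldl
          (fun (pos : PySem.Dict Int (List Int)) kv => pos.modify kv.2 [] (fun l => l ++ [kv.1]))
          PySem.Dict.empty).getD s []) ((iN : ℕ) : Int) with
      | some p => if p ≤ ((jN : ℕ) : Int) then ans + 1 else ans
      | none => ans)
    = ans + pvHit nums iN jN := by
  have hs : PySem.List.pyGetD
        (nums.foldl (fun pre v => pre ++ [PySem.List.pyGetD pre (-1) 0 + v]) [(0 : Int)])
        (((jN : ℕ) : Int) + 1) 0
      - PySem.List.pyGetD
        (nums.foldl (fun pre v => pre ++ [PySem.List.pyGetD pre (-1) 0 + v]) [(0 : Int)])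
        ((iN : ℕ) : Int) 0 = (pvSub nums iN jN).sum := by
    rw [show (((jN : ℕ) : Int) + 1) = (((jN + 1 : ℕ)) : Int) from by push_cast; ring,
      pre_getD nums (jN + 1) (by omega), pre_getD nums iN (by omega),
      pvSub_sum_eq nums iN jN (by omega)]
  dsimp only
  rw [hs, pos_getD]
  set ps := (PySem.List.pyRange 0 (nums.length : Int) 1).filter
      (fun k => PySem.List.pyGetD nums k 0 == (pvSub nums iN jN).sum) with hpsdef
  have hpair : ps.Pairwise (· < ·) :=
    List.Pairwise.filter _ (PySem.List.pairwise_lt_pyRange_one 0 (nums.length : Int))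
  have hex : (∃ p ∈ ps, ((iN : ℕ) : Int) ≤ p ∧ p ≤ ((jN : ℕ) : Int))
      ↔ (pvSub nums iN jN).sum ∈ pvSub nums iN jN := by
    rw [mem_pvSub_iff nums iN jN (by omega) hj]
    constructor
    · rintro ⟨p, hp, h1, h2⟩
      rw [hpsdef, List.mem_filter, PySem.List.mem_pyRange_one] at hp
      obtain ⟨⟨hp0, hpn⟩, hpv⟩ := hp
      refine ⟨p.toNat, by omega, by omega, ?_⟩
      have : ((p.toNat : ℕ) : Int) = p := Int.toNat_of_nonneg hp0
      rw [← PySem.List.pyGetD_natCast nums p.toNat 0, this]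
      exact eq_of_beq hpv
    · rintro ⟨k, h1, h2, hk⟩
      refine ⟨((k : ℕ) : Int), ?_, by exact_mod_cast h1, by exact_mod_cast h2⟩
      rw [hpsdef, List.mem_filter, PySem.List.mem_pyRange_one]
      refine ⟨⟨by omega, by exact_mod_cast (by omega : k < nums.length)⟩, ?_⟩
      rw [PySem.List.pyGetD_natCast nums k 0]
      exact beq_iff_eq.mpr hk
  have hfhit := firstAtLeast_hit ps hpair ((iN : ℕ) : Int) ((jN : ℕ) : Int)
  by_cases hm : (pvSub nums iN jN).sum ∈ pvSub nums iN jN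
  · have hb := hfhit.mpr (hex.mpr hm)
    have hpv : pvHit nums iN jN = 1 := by simp [pvHit, hm]
    rw [hpv]
    rcases hfl : firstAtLeast ps ((iN : ℕ) : Int) with _ | p
    · rw [hfl] at hb; simp at hb
    · rw [hfl] at hb
      by_cases hpj : p ≤ ((jN : ℕ) : Int)
      · simp [hpj]
      · simp [hpj] at hb
  · have hb : ¬ (match firstAtLeast ps ((iN : ℕ) : Int) with
        | some p => if p ≤ ((jN : ℕ) : Int) then true else false
        | none => false) = true := fun h => hm (hex.mp (hfhit.mp h))
    have hpv : pvHit nums iN jN = 0 := by simp [pvHit, hm]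
    rw [hpv]
    rcases hfl : firstAtLeast ps ((iN : ℕ) : Int) with _ | p
    · simp
    · rw [hfl] at hb
      by_cases hpj : p ≤ ((jN : ℕ) : Int)
      · simp [hpj] at hb
      · simp [hpj]

lemma B_inner (nums : List Int) (iN : ℕ) (m : ℕ) :
    ∀ (aN : ℕ) (ans : Int), iN < aN → aN + m = nums.length →
    ((PySem.List.pyRange (aN : Int) ((nums.length : Int)) 1).foldl
      (fun ans j =>
        let s := PySem.List.pyGetD
            (nums.foldl (fun pre v => pre ++ [PySem.List.pyGetD pre (-1) 0 + v]) [(0 : Int)])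
            (j + 1) 0
          - PySem.List.pyGetD
            (nums.foldl (fun pre v => pre ++ [PySem.List.pyGetD pre (-1) 0 + v]) [(0 : Int)])
            ((iN : ℕ) : Int) 0;
        match firstAtLeast
            (((PySem.List.enumerate nums).foldl
              (fun (pos : PySem.Dict Int (List Int)) kv => pos.modify kv.2 [] (fun l => l ++ [kv.1]))
              PySem.Dict.empty).getD s []) ((iN : ℕ) : Int) with
          | some p => if p ≤ j then ans + 1 else ans
          | none => ans)
      ans)
    = ans + ∑ k ∈ Finset.range m, pvHit nums iN (aN + k) := by
  induction m with
  | zero =>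
    intro aN ans h1 h2
    rw [PySem.List.pyRange_one_eq_nil (by exact_mod_cast (by omega : nums.length ≤ aN))]
    simp
  | succ m ih =>
    intro aN ans h1 h2
    rw [PySem.List.pyRange_one_cons (by exact_mod_cast (by omega : aN < nums.length)),
      List.foldl_cons, B_body_eq nums iN aN h1 (by omega) ans]
    have hih := ih (aN + 1) (ans + pvHit nums iN aN) (by omega) (by omega)
    rw [show (((aN : ℕ) : Int) + 1) = (((aN + 1 : ℕ)) : Int) from by push_cast; ring, hih,
      Finset.sum_range_succ']
    have hre : ∀ k, aN + 1 + k = aN + (k + 1) := fun k => by omega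
    simp only [hre, Nat.add_zero]
    ring

lemma B_eq (nums : List Int) :
    centeredSubarrays_initial_alt nums
    = (nums.length : Int) + ∑ i ∈ Finset.range nums.length,
        ∑ j ∈ Finset.Ico (i+1) nums.length, pvHit nums i j := by
  unfold centeredSubarrays_initial_alt
  dsimp only
  refine Eq.trans (PySem.List.foldl_congr_mem _ _
    (fun (ans i : Int) => ans +
      ∑ j ∈ Finset.Ico (i.toNat + 1) nums.length, pvHit nums i.toNat j) _ ?_) ?_
  · intro acc i hmem
    rw [PySem.List.mem_pyRange_one] at hmem
    obtain ⟨h0, hlt⟩ := hmem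
    have hiN : ((i.toNat : ℕ) : Int) = i := Int.toNat_of_nonneg h0
    dsimp only
    rw [← hiN,
      show ((i.toNat : ℕ) : Int) + 1 = (((i.toNat + 1 : ℕ)) : Int) from by push_cast; ring,
      B_inner nums i.toNat (nums.length - (i.toNat + 1)) (i.toNat + 1) acc
        (by omega) (by omega),
      Finset.sum_Ico_eq_sum_range]
    simp only [Int.toNat_natCast]
  · rw [PySem.List.foldl_add]
    rw [PySem.List.pyRange_one, List.map_map, list_range_map_sum]
    have hm : (((nums.length : Int) - 0)).toNat = nums.length := by omega
    rw [hm]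
    congr 1
    apply Finset.sum_congr rfl
    intro k hk
    simp

lemma pv_extend (F : ℕ → ℕ → Int) (n : ℕ) :
    ∑ i ∈ Finset.range (n-1), ∑ j ∈ Finset.Ico (i+1) n, F i j
    = ∑ i ∈ Finset.range n, ∑ j ∈ Finset.Ico (i+1) n, F i j := by
  cases n with
  | zero => simp
  | succ m =>
    rw [Finset.sum_range_succ]
    simp

lemma AB_eq (nums : List Int) :
    centeredSubarrays_initial nums = centeredSubarrays_initial_alt nums := by
  rw [A_eq, B_eq, pv_extend]

-- ===== VERDICT (by name: the statement is the Claim_ definition above) =====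
theorem centeredSubarrays_initial_spec : Claim_equal_centeredSubarrays_initial := by
  intro nums _
  unfold Spec_centeredSubarrays_initial
  exact AB_eq nums
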